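-- pv_equiv track=rewrite | github.com/reisenx/2110101-COM-PROG | P2-Grader-02-Practice/P2_03_Func2/P2_03_Func2.py | is_heterogram
-- ===== SOURCE A (Python) =====
-- def is_heterogram(text):
--     # Initialize a dictionary to count occurrences of each character
--     char_count = {}
--     # Iterate through each character in the text
--     for char in text.upper():
--         # First occurrence of the character
--         if char.isalpha() and char not in char_count:
--             char_count[char] = 1
--         # Repeated occurrence of the character
--         elif char.isalpha() and char in char_count:
--             return False
--     # If no character is repeated, return True
--     return True
-- ===== SOURCE B (Python) =====
-- def is_heterogram(text):
--     letters = sorted(c for c in text.upper() if c.isalpha())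
--     return all(a != b for a, b in zip(letters, letters[1:]))
-- ===== Notes on version B (the rewrite author's own statement) =====
-- stated objective: alternative
-- what changed: Replaced the early-exit seen-dict hash loop with a sort-then-scan algorithm: sort the uppercased alphabetic characters and check that no two adjacent sorted characters are equal.
import Mathlib
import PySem

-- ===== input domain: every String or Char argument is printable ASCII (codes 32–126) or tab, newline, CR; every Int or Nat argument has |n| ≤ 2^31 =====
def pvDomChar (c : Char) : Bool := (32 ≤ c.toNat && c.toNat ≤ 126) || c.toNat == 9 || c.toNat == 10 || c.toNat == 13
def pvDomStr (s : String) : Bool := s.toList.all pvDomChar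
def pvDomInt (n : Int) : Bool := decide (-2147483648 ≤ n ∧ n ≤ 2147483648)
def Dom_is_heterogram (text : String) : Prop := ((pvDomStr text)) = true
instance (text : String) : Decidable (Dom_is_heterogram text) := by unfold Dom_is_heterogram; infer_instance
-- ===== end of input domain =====

-- B replaces A's early-exit seen-dict hash loop with sort-then-scan: sort the
-- uppercased alphabetic characters and check no two adjacent ones are equal (alternative algorithm, O(n log n)).


-- ===== PORT A =====
-- for char in text.upper(): first occurrence -> record in dict; repeat -> return False
def hetLoopA (cs : List Char) (char_count : PySem.Dict Char Int) : Bool :=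
  match cs with
  | [] => true
  | c :: rest =>
    if PySem.Chars.isalpha c && !(char_count.contains c) then
      hetLoopA rest (char_count.insert c 1)
    else if PySem.Chars.isalpha c && char_count.contains c then
      false
    else
      hetLoopA rest char_count

def is_heterogram (text : String) : Bool :=
  hetLoopA (PySem.Str.upper text).toList PySem.Dict.empty

-- ===== PORT B =====
-- letters = sorted(filtered chars); all(a != b for a, b in zip(letters, letters[1:]))
def is_heterogram_alt (text : String) : Bool :=
  let letters := PySem.List.sorted
      ((PySem.Str.upper text).toList.filter (fun c => PySem.Chars.isalpha c)) (fun c => c) false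
  (letters.zip (PySem.List.slice letters (some 1) none)).all (fun p => p.1 != p.2)

-- ===== PRECONDITION & SPEC =====
def Spec_is_heterogram (text : String) (out : Bool) : Prop := out = is_heterogram_alt text
instance (text : String) (out : Bool) : Decidable (Spec_is_heterogram text out) := by unfold Spec_is_heterogram; infer_instance

-- ===== CLAIM (what is proved, stated in full; the proofs are below) =====
def Claim_equal_is_heterogram : Prop := ∀ (text : String), Dom_is_heterogram text → Spec_is_heterogram text (is_heterogram text)

-- ===== LEMMAS AND PROOFS =====

theorem hetLoopA_true_iff (cs : List Char) (d : PySem.Dict Char Int) :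
    hetLoopA cs d = true ↔
      ((cs.filter (fun c => PySem.Chars.isalpha c)).Nodup ∧
        ∀ x ∈ cs.filter (fun c => PySem.Chars.isalpha c), d.contains x = false) := by
  induction cs generalizing d with
  | nil => simp [hetLoopA]
  | cons c rest ih =>
    by_cases ha : PySem.Chars.isalpha c = true
    · by_cases hc : d.contains c = true
      · simp [hetLoopA, ha, hc]
      · simp only [Bool.not_eq_true] at hc
        simp only [hetLoopA, ha, hc, Bool.not_false, Bool.and_true, Bool.and_false,
          if_true, ih, List.filter_cons, List.nodup_cons, List.mem_cons,
          PySem.Dict.contains_insert]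
        constructor
        · rintro ⟨hn, hall⟩
          refine ⟨⟨fun hmem => by simpa [hmem] using hall c hmem, hn⟩, ?_⟩
          rintro x (rfl | hx)
          · exact hc
          · have := hall x hx
            simp only [Bool.or_eq_false_iff] at this
            exact this.2
        · rintro ⟨⟨hcmem, hn⟩, hall⟩
          refine ⟨hn, fun x hx => ?_⟩
          have hne : (x == c) = false := by
            simp only [beq_eq_false_iff_ne, ne_eq]
            rintro rfl; exact hcmem hx
          simp [hne, hall x (Or.inr hx)]
    · simp only [Bool.not_eq_true] at ha
      simp [hetLoopA, ha, ih]

-- on a ≤-sorted list, "no two adjacent elements equal" is exactly Nodup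
theorem adj_neq_iff_nodup (ls : List Char) (hp : ls.Pairwise (· ≤ ·)) :
    ((ls.zip ls.tail).all (fun p => p.1 != p.2) = true) ↔ ls.Nodup := by
  induction ls with
  | nil => simp
  | cons c rest ih =>
    cases rest with
    | nil => simp
    | cons d t =>
      have hp' : (d :: t).Pairwise (· ≤ ·) := hp.tail
      have hcd : c ≤ d := (List.pairwise_cons.mp hp).1 d (by simp)
      have hdall : ∀ x ∈ t, d ≤ x := (List.pairwise_cons.mp hp').1
      simp only [List.tail_cons, List.zip_cons_cons, List.all_cons, Bool.and_eq_true,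
        bne_iff_ne, ne_eq, List.nodup_cons, List.mem_cons]
      rw [show ((d :: t).zip t).all (fun p => p.1 != p.2) = true ↔ (d :: t).Nodup from ih hp']
      simp only [List.nodup_cons]
      constructor
      · rintro ⟨hne, hnmemd, hnd⟩
        refine ⟨?_, hnmemd, hnd⟩
        rintro (rfl | hx)
        · exact hne rfl
        · exact hne (le_antisymm hcd (hdall c hx))
      · rintro ⟨hnmem, hnmemd, hnd⟩
        exact ⟨fun h => hnmem (Or.inl h), hnmemd, hnd⟩

-- ===== VERDICT (by name: the statement is the Claim_ definition above) =====
theorem is_heterogram_spec : Claim_equal_is_heterogram := by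
  intro text _
  unfold Spec_is_heterogram is_heterogram is_heterogram_alt
  set letters0 := (PySem.Str.upper text).toList.filter (fun c => PySem.Chars.isalpha c) with hl
  set ls := PySem.List.sorted letters0 (fun c => c) false with hs
  have hperm : ls.Perm letters0 := PySem.List.sorted_perm _ _ _
  have hpw : ls.Pairwise (fun a b => a ≤ b) := by
    simpa using PySem.List.sorted_pairwise letters0 (fun c => c)
  rw [Bool.eq_iff_iff, hetLoopA_true_iff]
  simp only [PySem.Dict.contains, PySem.Dict.empty]
  rw [PySem.List.slice_from_one]
  rw [adj_neq_iff_nodup ls hpw]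
  constructor
  · rintro ⟨hnd, _⟩; exact hperm.nodup_iff.mpr hnd
  · intro hnd
    exact ⟨hperm.nodup_iff.mp hnd, by intro x _; rfl⟩
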